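-- pv_equiv track=rewrite | github.com/meh9184/coding-test-practice | estsoft/test1_copy.py | solution
-- ===== SOURCE A (Python) =====
-- def solution(S):
--
--     pos_aaa = []
--     pos_aaa.append(S.find("aaa",0))
--
--     if pos_aaa[0] != -1:
--         i = 0
--         while True:
--             idx = S.find("aaa", pos_aaa[i]+1)
--
--             if idx != -1:
--                 pos_aaa.append(idx)
--             else:
--                 break
--             i = i+1
--     else:
--         pos_aaa = []
--
--
--     pos_bbb = []
--
--     pos_bbb.append(S.find("bbb",0))
--
--     if pos_bbb[0] != -1:
--         i = 0
--         while True: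
--             idx = S.find("bbb", pos_bbb[i]+1)
--
--             if idx != -1:
--                 pos_bbb.append(idx)
--             else:
--                 break
--             i = i+1
--     else:
--         pos_bbb = []
--
--     pos = pos_aaa + pos_bbb
--     pos.sort()
--
--     if pos == []:
--         rst = len(S)
--     else:
--         diffs = []
--         diffs.append(pos[0]+2)
--         for i in range(len(pos)-1):
--             diff = pos[i+1]-pos[i]+1
--             if diff > 2:
--                 diffs.append(diff)
--
--         ### 추가된 부분 ###
--         diffs.append(len(S) - pos[-1] - 1)
--
--         rst = max(diffs)
--
--     return rst
-- ===== SOURCE B (Python) =====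
-- def solution(S):
--     n = len(S)
--     hits = [i for i in range(n - 2) if S[i:i+3] in ("aaa", "bbb")]
--     if not hits:
--         return n
--     best = hits[0] + 2
--     prev = hits[0]
--     for h in hits[1:]:
--         d = h - prev + 1
--         if d > 2 and d > best:
--             best = d
--         prev = h
--     return max(best, n - prev - 1)
-- ===== Notes on version B (the rewrite author's own statement) =====
-- stated objective: simpler
-- what changed: B replaces A's two repeated-str.find collection loops plus concatenate-and-sort plus an index-based diff loop by a single left-to-right scan that collects all 'aaa'/'bbb' start positions already in order and folds a running maximum over consecutive gaps.
import Mathlib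
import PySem

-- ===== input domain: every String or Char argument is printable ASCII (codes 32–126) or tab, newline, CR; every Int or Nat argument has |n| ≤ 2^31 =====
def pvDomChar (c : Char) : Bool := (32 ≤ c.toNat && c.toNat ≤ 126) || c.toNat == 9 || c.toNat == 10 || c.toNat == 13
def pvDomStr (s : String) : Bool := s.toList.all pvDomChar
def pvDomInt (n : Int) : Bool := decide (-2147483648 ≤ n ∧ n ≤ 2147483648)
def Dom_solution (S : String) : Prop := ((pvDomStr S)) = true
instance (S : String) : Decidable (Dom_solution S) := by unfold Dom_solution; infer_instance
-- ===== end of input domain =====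

-- B replaces A's two repeated-str.find collection loops + concatenate-and-sort + index diff loop
-- by one left-to-right scan collecting the 'aaa'/'bbb' start positions (already in order) and a
-- running maximum over the consecutive gaps.

-- ===== PORT A =====

-- 'S.find(p, k)' with a start past the end yields -1 (used only for the while-loop termination)
theorem pvFindFrom_of_length_lt (cs p : List Char) (k : Nat) (h : cs.length < k) :
    PySem.Chars.findFrom cs p (k : Int) none = -1 := by
  simp only [PySem.Chars.findFrom]
  have h1 : ¬ ((k : Int) < 0) := by omega
  have h2 : (cs.length : Int) < (k : Int) := by exact_mod_cast h
  simp [h1, h2]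

-- a successful find lands between the start and the length (used only for termination)
theorem pvFindFrom_bounds (cs p : List Char) (k : Nat) (hk : k ≤ cs.length)
    (h : PySem.Chars.findFrom cs p (k : Int) none ≠ -1) :
    (k : Int) ≤ PySem.Chars.findFrom cs p (k : Int) none ∧
      PySem.Chars.findFrom cs p (k : Int) none ≤ (cs.length : Int) := by
  rw [PySem.Chars.findFrom_natCast cs p k hk] at h ⊢
  by_cases hf : PySem.Chars.find (List.drop k cs) p = -1
  · simp [hf] at h
  · have h1 := PySem.Chars.neg_one_le_find (List.drop k cs) p
    have h2 := PySem.Chars.find_le_length (List.drop k cs) p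
    simp only [List.length_drop] at h2
    rw [if_neg hf]
    constructor
    · omega
    · omega

-- the 'while True: idx = S.find(p, pos[i]+1); …' loop of A
def solutionFindLoop (cs p : List Char) (last : Nat) : List Int :=
  let idx := PySem.Chars.findFrom cs p ((last : Int) + 1) none
  if _h : idx = -1 then []
  else idx :: solutionFindLoop cs p idx.toNat
termination_by cs.length - last
decreasing_by
  by_cases hk : last + 1 ≤ cs.length
  · have hb := pvFindFrom_bounds cs p (last + 1) hk (by exact_mod_cast _h)
    push_cast at hb
    omega
  · exact absurd (by exact_mod_cast pvFindFrom_of_length_lt cs p (last + 1) (by omega)) _h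

-- pos_aaa / pos_bbb: first find from 0, then the while loop
def solutionFindAll (S : String) (p : String) : List Int :=
  let f0 := PySem.Str.findFrom S p 0
  if f0 = -1 then []
  else f0 :: solutionFindLoop S.toList p.toList f0.toNat

def solution (S : String) : Int :=
  let pos_aaa := solutionFindAll S "aaa"
  let pos_bbb := solutionFindAll S "bbb"
  let pos := PySem.List.sorted (pos_aaa ++ pos_bbb) (fun x => x)
  if pos = [] then PySem.Str.len S
  else
    let diffs : List Int := [PySem.List.pyGetD pos 0 0 + 2]
    let diffs := (PySem.List.pyRange 0 ((pos.length : Int) - 1) 1).foldl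
      (fun acc i =>
        let diff := PySem.List.pyGetD pos (i + 1) 0 - PySem.List.pyGetD pos i 0 + 1
        if diff > 2 then acc ++ [diff] else acc) diffs
    let diffs := diffs ++ [PySem.Str.len S - PySem.List.pyGetD pos (-1) 0 - 1]
    -- max(diffs): diffs always contains pos[0]+2, so the default of maxD is never used
    PySem.List.maxD diffs (fun x => x) 0

-- ===== PORT B =====
def solution_alt (S : String) : Int :=
  let n := PySem.Str.len S
  let hits := (PySem.List.pyRange 0 (n - 2) 1).filter
    (fun i => PySem.Str.slice S (some i) (some (i + 3)) == "aaa"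
           || PySem.Str.slice S (some i) (some (i + 3)) == "bbb")
  match hits with
  | [] => n
  | h0 :: rest =>
    let bp := rest.foldl
      (fun (bp : Int × Int) h =>
        let d := h - bp.2 + 1
        (if d > 2 ∧ d > bp.1 then d else bp.1, h)) (h0 + 2, h0)
    max bp.1 (n - bp.2 - 1)

-- ===== PRECONDITION & SPEC =====
def Spec_solution (S : String) (out : Int) : Prop := out = solution_alt S
instance (S : String) (out : Int) : Decidable (Spec_solution S out) := by unfold Spec_solution; infer_instance

-- ===== CLAIM (what is proved, stated in full; the proofs are below) =====
def Claim_equal_solution : Prop := ∀ (S : String), Dom_solution S → Spec_solution S (solution S)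

-- ===== LEMMAS AND PROOFS =====

-- the positions ≥ k at which p starts in cs, in increasing order
def occFrom (cs p : List Char) (k : Nat) : List Nat :=
  (List.range cs.length).filter (fun i => decide (k ≤ i) && p.isPrefixOf (cs.drop i))

-- all positions at which "aaa" or "bbb" starts in cs, in increasing order
def occAll (cs : List Char) : List Nat :=
  (List.range cs.length).filter
    (fun i => "aaa".toList.isPrefixOf (cs.drop i) || "bbb".toList.isPrefixOf (cs.drop i))

-- the gaps pos[i+1]-pos[i]+1 that exceed 2, in order
def gaps : List Nat → List Int
  | a :: b :: t =>
      (if ((b : Int) - (a : Int) + 1) > 2 then [((b : Int) - (a : Int) + 1)] else []) ++ gaps (b :: t)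
  | _ => []

theorem occFrom_nil_of_none (cs p : List Char) (k : Nat)
    (h : ∀ i, k ≤ i → ¬ p <+: cs.drop i) : occFrom cs p k = [] := by
  rw [occFrom, List.filter_eq_nil_iff]
  intro i _ hcon
  simp only [Bool.and_eq_true, decide_eq_true_eq, List.isPrefixOf_iff_prefix] at hcon
  exact h i hcon.1 hcon.2

theorem occFrom_nil_of_big (cs p : List Char) (k : Nat) (h : cs.length ≤ k) :
    occFrom cs p k = [] := by
  rw [occFrom, List.filter_eq_nil_iff]
  intro i hi hcon
  simp only [List.mem_range] at hi
  simp only [Bool.and_eq_true, decide_eq_true_eq] at hcon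
  omega

theorem occFrom_cons (cs p : List Char) (k m : Nat)
    (hkm : k ≤ m) (hmlen : m < cs.length) (hm : p <+: cs.drop m)
    (hmin : ∀ i, k ≤ i → i < m → ¬ p <+: cs.drop i) :
    occFrom cs p k = m :: occFrom cs p (m + 1) := by
  have hsplit : List.range cs.length
      = List.range (m + 1) ++ List.map (fun x => (m + 1) + x) (List.range (cs.length - (m + 1))) := by
    rw [← List.range_add]; congr 1; omega
  rw [occFrom, occFrom, hsplit, List.filter_append, List.filter_append]
  have h1 : List.filter (fun i => decide (k ≤ i) && p.isPrefixOf (cs.drop i)) (List.range (m + 1))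
      = [m] := by
    rw [List.range_succ, List.filter_append]
    have hlo : List.filter (fun i => decide (k ≤ i) && p.isPrefixOf (cs.drop i)) (List.range m) = [] := by
      rw [List.filter_eq_nil_iff]
      intro i hi hcon
      simp only [List.mem_range] at hi
      simp only [Bool.and_eq_true, decide_eq_true_eq, List.isPrefixOf_iff_prefix] at hcon
      exact hmin i hcon.1 hi hcon.2
    rw [hlo]
    simp [hkm, List.isPrefixOf_iff_prefix, hm]
  have h2 : List.filter (fun i => decide (m + 1 ≤ i) && p.isPrefixOf (cs.drop i)) (List.range (m + 1))
      = [] := by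
    rw [List.filter_eq_nil_iff]
    intro i hi hcon
    simp only [List.mem_range] at hi
    simp only [Bool.and_eq_true, decide_eq_true_eq] at hcon
    omega
  have h3 : List.filter (fun i => decide (k ≤ i) && p.isPrefixOf (cs.drop i))
        (List.map (fun x => (m + 1) + x) (List.range (cs.length - (m + 1))))
      = List.filter (fun i => decide (m + 1 ≤ i) && p.isPrefixOf (cs.drop i))
        (List.map (fun x => (m + 1) + x) (List.range (cs.length - (m + 1)))) := by
    apply List.filter_congr
    intro x hx
    obtain ⟨y, -, rfl⟩ := List.mem_map.mp hx
    have e1 : decide (k ≤ m + 1 + y) = true := by simp; omega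
    have e2 : decide (m + 1 ≤ m + 1 + y) = true := by simp
    rw [e1, e2]
  rw [h1, h2, h3]
  simp

theorem no_prefix_of_findFrom_neg (cs p : List Char) (k : Nat) (hk : k ≤ cs.length)
    (h : PySem.Chars.findFrom cs p (k : Int) none = -1) :
    ∀ i, k ≤ i → ¬ p <+: cs.drop i := by
  intro i hki hpre
  have hno : ¬ p <:+: List.drop k cs :=
    (PySem.Chars.findFrom_natCast_eq_neg_one_iff cs p k hk).mp h
  apply hno
  rw [← PySem.Chars.isIn_iff_infix, ← PySem.Chars.exists_prefix_drop_iff_isIn]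
  refine ⟨i - k, ?_⟩
  rwa [List.drop_drop, Nat.add_sub_cancel' hki]

theorem lt_length_of_prefix_drop {cs p : List Char} (hp : p ≠ []) {m : Nat}
    (h : p <+: cs.drop m) : m < cs.length := by
  by_contra hc
  rw [List.drop_eq_nil_of_le (by omega)] at h
  exact hp (List.prefix_nil.mp h)

theorem solutionFindLoop_eq (cs p : List Char) (hp : p ≠ []) :
    ∀ (N last : Nat), cs.length - last ≤ N →
      solutionFindLoop cs p last = (occFrom cs p (last + 1)).map (fun m : Nat => (m : Int)) := by
  intro N
  induction N with
  | zero =>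
    intro last hN
    rw [solutionFindLoop]
    have hneg : PySem.Chars.findFrom cs p ((last : Int) + 1) none = -1 := by
      have := pvFindFrom_of_length_lt cs p (last + 1) (by omega)
      push_cast at this
      exact this
    rw [occFrom_nil_of_big cs p (last + 1) (by omega)]
    simp [hneg]
  | succ N ih =>
    intro last hN
    rw [solutionFindLoop]
    have hcast : ((last : Int) + 1) = (((last + 1 : Nat)) : Int) := by push_cast; ring
    by_cases hk : last + 1 ≤ cs.length
    · by_cases hneg : PySem.Chars.findFrom cs p ((last : Int) + 1) none = -1
      · rw [occFrom_nil_of_none cs p (last + 1)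
          (no_prefix_of_findFrom_neg cs p (last + 1) hk (by rw [← hcast]; exact hneg))]
        simp [hneg]
      · have hneg' : PySem.Chars.findFrom cs p (((last + 1 : Nat)) : Int) none ≠ -1 := by
          rw [← hcast]; exact hneg
        obtain ⟨hge, hpre, hmin⟩ := PySem.Chars.findFrom_natCast_spec cs p (last + 1) hk hneg'
        rw [← hcast] at hge hpre hmin
        set idx := PySem.Chars.findFrom cs p ((last : Int) + 1) none with hidx
        have h0 : (0 : Int) ≤ idx := by omega
        have hge' : last + 1 ≤ idx.toNat := by omega
        have hlen : idx.toNat < cs.length := lt_length_of_prefix_drop hp hpre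
        rw [occFrom_cons cs p (last + 1) idx.toNat hge' hlen hpre hmin]
        simp only [hneg, dif_neg, not_false_iff, List.map_cons]
        congr 1
        · omega
        · rw [ih idx.toNat (by omega)]
    · have hneg : PySem.Chars.findFrom cs p ((last : Int) + 1) none = -1 := by
        have := pvFindFrom_of_length_lt cs p (last + 1) (by omega)
        push_cast at this
        exact this
      rw [occFrom_nil_of_big cs p (last + 1) (by omega)]
      simp [hneg]

theorem solutionFindAll_eq (S p : String) (hp : p.toList ≠ []) :
    solutionFindAll S p = (occFrom S.toList p.toList 0).map (fun m : Nat => (m : Int)) := by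
  rw [solutionFindAll]
  simp only [PySem.Str.findFrom_eq]
  have hz : (0 : Int) = ((0 : Nat) : Int) := rfl
  by_cases hneg : PySem.Chars.findFrom S.toList p.toList 0 none = -1
  · rw [occFrom_nil_of_none S.toList p.toList 0
      (no_prefix_of_findFrom_neg S.toList p.toList 0 (Nat.zero_le _) (by rw [← hz]; exact hneg))]
    simp [hneg]
  · have hneg' : PySem.Chars.findFrom S.toList p.toList ((0 : Nat) : Int) none ≠ -1 := by
      rw [← hz]; exact hneg
    obtain ⟨hge, hpre, hmin⟩ :=
      PySem.Chars.findFrom_natCast_spec S.toList p.toList 0 (Nat.zero_le _) hneg'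
    rw [← hz] at hge hpre hmin
    set f0 := PySem.Chars.findFrom S.toList p.toList 0 none with hf0
    have h0 : (0 : Int) ≤ f0 := by omega
    have hlen : f0.toNat < S.toList.length := lt_length_of_prefix_drop hp hpre
    rw [occFrom_cons S.toList p.toList 0 f0.toNat (Nat.zero_le _) hlen hpre
      (fun i hi hlt => hmin i hi hlt)]
    simp only [hneg, if_neg, not_false_iff, List.map_cons]
    congr 1
    · omega
    · rw [solutionFindLoop_eq S.toList p.toList hp S.toList.length f0.toNat (by omega)]

theorem occFrom_zero (cs p : List Char) :
    occFrom cs p 0 = (List.range cs.length).filter (fun i => p.isPrefixOf (cs.drop i)) := by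
  rw [occFrom]
  apply List.filter_congr
  intro x _
  simp

theorem filter_or_perm {α : Type} (l : List α) (P Q : α → Bool)
    (h : ∀ i ∈ l, ¬(P i = true ∧ Q i = true)) :
    (l.filter (fun i => P i || Q i)).Perm (l.filter P ++ l.filter Q) := by
  induction l with
  | nil => simp
  | cons x xs ih =>
    have hx := h x (by simp)
    have ht : ∀ i ∈ xs, ¬(P i = true ∧ Q i = true) := fun i hi => h i (by simp [hi])
    by_cases hP : P x = true
    · have hQ : Q x ≠ true := fun hq => hx ⟨hP, hq⟩
      simp only [List.filter_cons, hP, hQ, Bool.true_or, if_true, if_false, cond_true,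
        Bool.false_eq_true, ite_false, ite_true, List.cons_append]
      exact (ih ht).cons x
    · by_cases hQ : Q x = true
      · simp only [List.filter_cons, hP, hQ, Bool.false_or, Bool.false_eq_true, ite_false,
          ite_true, if_true, if_false]
        exact ((ih ht).cons x).trans List.perm_middle.symm
      · simp only [List.filter_cons, hP, hQ, Bool.false_or, Bool.false_eq_true, ite_false]
        exact ih ht

theorem not_both (cs : List Char) (i : Nat) :
    ¬("aaa".toList.isPrefixOf (cs.drop i) = true ∧ "bbb".toList.isPrefixOf (cs.drop i) = true) := by
  rintro ⟨ha, hb⟩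
  rw [List.isPrefixOf_iff_prefix] at ha hb
  obtain ⟨t1, h1⟩ := ha
  obtain ⟨t2, h2⟩ := hb
  rw [← h1] at h2
  have ea : "aaa".toList = ['a', 'a', 'a'] := rfl
  have eb : "bbb".toList = ['b', 'b', 'b'] := rfl
  rw [ea, eb] at h2
  simp at h2

theorem pos_sorted_eq (S : String) :
    PySem.List.sorted (solutionFindAll S "aaa" ++ solutionFindAll S "bbb") (fun x => x)
      = (occAll S.toList).map (fun m : Nat => (m : Int)) := by
  apply PySem.List.sorted_eq_of_perm_of_pairwise_lt
  · rw [solutionFindAll_eq S "aaa" (by decide), solutionFindAll_eq S "bbb" (by decide),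
      occFrom_zero, occFrom_zero, occAll, ← List.map_append]
    exact List.Perm.map _ (filter_or_perm _ _ _ (fun i _ => not_both S.toList i))
  · have h1 : (occAll S.toList).Pairwise (· < ·) :=
      List.Pairwise.sublist List.filter_sublist List.pairwise_lt_range
    exact List.pairwise_map.mpr (h1.imp (fun h => by exact_mod_cast h))

theorem slice_eq_aaa_iff (S : String) (k : Nat) (p : String) (hp : p.toList.length = 3) :
    (PySem.Str.slice S (some ((k : Int))) (some ((k : Int) + 3)) == p) = true
      ↔ p.toList <+: S.toList.drop k := by
  have h3 : ((k : Int) + 3) = (((k + 3 : Nat)) : Int) := by push_cast; ring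
  rw [beq_iff_eq, ← String.toList_inj, PySem.Str.toList_slice]
  simp only [PySem.Chars.slice]
  rw [h3, PySem.List.slice_natCast]
  have ht : k + 3 - k = 3 := by omega
  rw [ht]
  constructor
  · intro h
    rw [← h]
    exact List.take_prefix _ _
  · intro h
    rw [List.prefix_iff_eq_take, hp] at h
    exact h.symm

theorem hits_eq (S : String) :
    (PySem.List.pyRange 0 (PySem.Str.len S - 2) 1).filter
      (fun i => PySem.Str.slice S (some i) (some (i + 3)) == "aaa"
             || PySem.Str.slice S (some i) (some (i + 3)) == "bbb")
    = (occAll S.toList).map (fun m : Nat => (m : Int)) := by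
  rw [PySem.List.pyRange_one, List.filter_map]
  have hlen : ((PySem.Str.len S - 2) - 0).toNat = S.toList.length - 2 := by
    rw [PySem.Str.len_eq]; omega
  rw [hlen]
  have hpred : ∀ x ∈ List.range (S.toList.length - 2),
      ((fun i => PySem.Str.slice S (some i) (some (i + 3)) == "aaa"
             || PySem.Str.slice S (some i) (some (i + 3)) == "bbb") ∘ (fun k : Nat => (0 : Int) + k)) x
      = (fun i => "aaa".toList.isPrefixOf (S.toList.drop i) || "bbb".toList.isPrefixOf (S.toList.drop i)) x := by
    intro x _
    simp only [Function.comp_apply, zero_add]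
    rw [Bool.eq_iff_iff]
    simp only [Bool.or_eq_true]
    rw [slice_eq_aaa_iff S x "aaa" (by decide), slice_eq_aaa_iff S x "bbb" (by decide),
      List.isPrefixOf_iff_prefix, List.isPrefixOf_iff_prefix]
  rw [List.filter_congr hpred]
  have hrange : (List.range (S.toList.length - 2)).filter
        (fun i => "aaa".toList.isPrefixOf (S.toList.drop i) || "bbb".toList.isPrefixOf (S.toList.drop i))
      = (List.range S.toList.length).filter
        (fun i => "aaa".toList.isPrefixOf (S.toList.drop i) || "bbb".toList.isPrefixOf (S.toList.drop i)) := by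
    obtain ⟨d, hd⟩ : ∃ d, S.toList.length = (S.toList.length - 2) + d := ⟨S.toList.length - (S.toList.length - 2), by omega⟩
    conv_rhs => rw [hd]
    rw [List.range_add, List.filter_append]
    have hnil : (List.map (fun x => (S.toList.length - 2) + x) (List.range d)).filter
        (fun i => "aaa".toList.isPrefixOf (S.toList.drop i) || "bbb".toList.isPrefixOf (S.toList.drop i)) = [] := by
      rw [List.filter_eq_nil_iff]
      intro a ha hcon
      obtain ⟨y, hy, rfl⟩ := List.mem_map.mp ha
      simp only [Bool.or_eq_true, List.isPrefixOf_iff_prefix] at hcon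
      have hle : 3 ≤ (S.toList.drop ((S.toList.length - 2) + y)).length := by
        rcases hcon with h | h
        · have := h.length_le; simpa using this
        · have := h.length_le; simpa using this
      simp only [List.length_drop] at hle
      omega
    rw [hnil, List.append_nil]
  rw [hrange, occAll]
  apply List.map_congr_left
  intro x _
  simp
theorem diffLoopNat (L : List Nat) : ∀ (x : Nat) (init : List Int),
    (List.range ((x :: L).length - 1)).foldl
      (fun acc k =>
        if ((x :: L).map (fun m : Nat => (m : Int))).getD (k + 1) 0
              - ((x :: L).map (fun m : Nat => (m : Int))).getD k 0 + 1 > 2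
        then acc ++ [((x :: L).map (fun m : Nat => (m : Int))).getD (k + 1) 0
              - ((x :: L).map (fun m : Nat => (m : Int))).getD k 0 + 1]
        else acc) init
    = init ++ gaps (x :: L) := by
  induction L with
  | nil => intro x init; simp [gaps]
  | cons y t ih =>
    intro x init
    have hlen : (x :: y :: t).length - 1 = 1 + t.length := by simp; omega
    rw [hlen, List.range_add, List.foldl_append]
    have hr1 : List.range 1 = [0] := rfl
    rw [hr1]
    simp only [List.foldl_cons, List.foldl_nil, List.foldl_map]
    have hz1 : (List.map (fun m : Nat => (m : Int)) (x :: y :: t)).getD (0 + 1) 0 = (y : Int) := by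
      simp
    have hz0 : (List.map (fun m : Nat => (m : Int)) (x :: y :: t)).getD 0 0 = (x : Int) := by
      simp
    rw [hz1, hz0]
    have hbody : (fun (acc : List Int) (z : Nat) =>
        if (List.map (fun m : Nat => (m : Int)) (x :: y :: t)).getD (1 + z + 1) 0
              - (List.map (fun m : Nat => (m : Int)) (x :: y :: t)).getD (1 + z) 0 + 1 > 2
        then acc ++ [(List.map (fun m : Nat => (m : Int)) (x :: y :: t)).getD (1 + z + 1) 0
              - (List.map (fun m : Nat => (m : Int)) (x :: y :: t)).getD (1 + z) 0 + 1]
        else acc)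
        = (fun (acc : List Int) (k : Nat) =>
        if ((y :: t).map (fun m : Nat => (m : Int))).getD (k + 1) 0
              - ((y :: t).map (fun m : Nat => (m : Int))).getD k 0 + 1 > 2
        then acc ++ [((y :: t).map (fun m : Nat => (m : Int))).getD (k + 1) 0
              - ((y :: t).map (fun m : Nat => (m : Int))).getD k 0 + 1]
        else acc) := by
      funext acc z
      have e1 : 1 + z + 1 = (z + 1) + 1 := by omega
      have e2 : 1 + z = z + 1 := by omega
      rw [e1, e2]
      simp only [List.map_cons, List.getD_cons_succ]
    rw [hbody]
    have hstep : (if (y : Int) - (x : Int) + 1 > 2 then init ++ [(y : Int) - (x : Int) + 1] else init)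
        = init ++ (if (y : Int) - (x : Int) + 1 > 2 then [(y : Int) - (x : Int) + 1] else []) := by
      split_ifs <;> simp
    rw [hstep]
    have hfin := ih y (init ++ (if (y : Int) - (x : Int) + 1 > 2 then [(y : Int) - (x : Int) + 1] else []))
    rw [show (y :: t).length - 1 = t.length from by simp] at hfin
    rw [hfin, List.append_assoc]
    congr 1

theorem bFoldEq (xs : List Nat) : ∀ (b : Int) (p : Nat),
    (xs.map (fun m : Nat => (m : Int))).foldl
      (fun (bp : Int × Int) h =>
        (if h - bp.2 + 1 > 2 ∧ h - bp.2 + 1 > bp.1 then h - bp.2 + 1 else bp.1, h)) (b, (p : Int))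
    = ((gaps (p :: xs)).foldl max b, (((p :: xs).getLast (List.cons_ne_nil _ _) : Nat) : Int)) := by
  induction xs with
  | nil => intro b p; simp [gaps]
  | cons y t ih =>
    intro b p
    simp only [List.map_cons, List.foldl_cons]
    have hlast : ((p :: y :: t).getLast (List.cons_ne_nil _ _)) = ((y :: t).getLast (List.cons_ne_nil _ _)) :=
      List.getLast_cons _
    rw [hlast]
    have hgaps : gaps (p :: y :: t)
        = (if (y : Int) - (p : Int) + 1 > 2 then [(y : Int) - (p : Int) + 1] else []) ++ gaps (y :: t) := by
      rw [gaps]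
    rw [hgaps, List.foldl_append]
    have hb : (if (y : Int) - (p : Int) + 1 > 2 then [(y : Int) - (p : Int) + 1] else []).foldl max b
        = if (y : Int) - (p : Int) + 1 > 2 ∧ (y : Int) - (p : Int) + 1 > b
          then (y : Int) - (p : Int) + 1 else b := by
      by_cases hd : (y : Int) - (p : Int) + 1 > 2
      · rw [if_pos hd]
        simp only [List.foldl_cons, List.foldl_nil]
        rw [max_def]
        split_ifs <;> omega
      · rw [if_neg hd, List.foldl_nil, if_neg (fun hc => hd hc.1)]
    rw [hb]
    exact ih _ y

theorem maxD_cons (l : List Int) : ∀ (c : Int),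
    PySem.List.maxD (c :: l) (fun x => x) 0 = l.foldl max c := by
  induction l with
  | nil => intro c; rfl
  | cons x t ih =>
    intro c
    have ihx := ih x
    have ihc := ih c
    simp only [PySem.List.maxD, PySem.List.max?, List.foldl_cons] at ihx ihc ⊢
    by_cases h : c < x
    · rw [if_pos h, max_eq_right (le_of_lt h)]
      exact ihx
    · rw [if_neg h, max_eq_left (by omega)]
      exact ihc

-- ===== VERDICT (by name: the statement is the Claim_ definition above) =====
theorem solution_spec : Claim_equal_solution := by
  intro S _
  unfold Spec_solution
  rw [solution, solution_alt]
  simp only []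
  rw [pos_sorted_eq S, hits_eq S]
  cases hocc : occAll S.toList with
  | nil => simp
  | cons x xs =>
    simp only [List.map_cons]
    rw [if_neg (by simp)]
    have hA1 : PySem.List.pyGetD ((x : Int) :: xs.map (fun m : Nat => (m : Int))) 0 0 = (x : Int) :=
      PySem.List.pyGetD_zero_cons _ _ _
    have hA2 : PySem.List.pyGetD ((x : Int) :: xs.map (fun m : Nat => (m : Int))) (-1) 0
        = (((x :: xs).getLast (List.cons_ne_nil _ _) : Nat) : Int) := by
      rw [show ((x : Int) :: xs.map (fun m : Nat => (m : Int))) = (x :: xs).map (fun m : Nat => (m : Int)) from rfl]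
      rw [PySem.List.pyGetD_neg_one _ _ (by simp), List.getLast_map]
    rw [hA1, hA2]
    -- reduce A's index loop over pyRange to the Nat-range loop
    have hlen : (((((x : Int) :: xs.map (fun m : Nat => (m : Int))).length : Int) - 1) - 0).toNat
        = (x :: xs).length - 1 := by simp
    have hloop : (PySem.List.pyRange 0 ((((x : Int) :: xs.map (fun m : Nat => (m : Int))).length : Int) - 1) 1).foldl
        (fun acc i =>
          if PySem.List.pyGetD ((x : Int) :: xs.map (fun m : Nat => (m : Int))) (i + 1) 0
              - PySem.List.pyGetD ((x : Int) :: xs.map (fun m : Nat => (m : Int))) i 0 + 1 > 2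
          then acc ++ [PySem.List.pyGetD ((x : Int) :: xs.map (fun m : Nat => (m : Int))) (i + 1) 0
              - PySem.List.pyGetD ((x : Int) :: xs.map (fun m : Nat => (m : Int))) i 0 + 1]
          else acc) [(x : Int) + 2]
        = [(x : Int) + 2] ++ gaps (x :: xs) := by
      rw [PySem.List.pyRange_one, hlen]
      simp only [List.foldl_map]
      have hbody : (fun (acc : List Int) (k : Nat) =>
          if PySem.List.pyGetD ((x : Int) :: xs.map (fun m : Nat => (m : Int))) ((0 : Int) + k + 1) 0
              - PySem.List.pyGetD ((x : Int) :: xs.map (fun m : Nat => (m : Int))) ((0 : Int) + k) 0 + 1 > 2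
          then acc ++ [PySem.List.pyGetD ((x : Int) :: xs.map (fun m : Nat => (m : Int))) ((0 : Int) + k + 1) 0
              - PySem.List.pyGetD ((x : Int) :: xs.map (fun m : Nat => (m : Int))) ((0 : Int) + k) 0 + 1]
          else acc)
          = (fun (acc : List Int) (k : Nat) =>
          if ((x :: xs).map (fun m : Nat => (m : Int))).getD (k + 1) 0
                - ((x :: xs).map (fun m : Nat => (m : Int))).getD k 0 + 1 > 2
          then acc ++ [((x :: xs).map (fun m : Nat => (m : Int))).getD (k + 1) 0
                - ((x :: xs).map (fun m : Nat => (m : Int))).getD k 0 + 1]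
          else acc) := by
        funext acc k
        have e1 : ((0 : Int) + k + 1) = (((k + 1 : Nat)) : Int) := by push_cast; ring
        have e2 : ((0 : Int) + k) = ((k : Nat) : Int) := by push_cast; ring
        rw [e1, e2, PySem.List.pyGetD_natCast, PySem.List.pyGetD_natCast]
        simp only [List.map_cons]
      rw [hbody, diffLoopNat xs x [(x : Int) + 2]]
    rw [hloop]
    rw [show ([(x : Int) + 2] ++ gaps (x :: xs)) ++ [PySem.Str.len S
          - (((x :: xs).getLast (List.cons_ne_nil _ _) : Nat) : Int) - 1]
        = ((x : Int) + 2) :: (gaps (x :: xs) ++ [PySem.Str.len S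
          - (((x :: xs).getLast (List.cons_ne_nil _ _) : Nat) : Int) - 1]) by simp]
    rw [maxD_cons, List.foldl_append]
    rw [bFoldEq xs ((x : Int) + 2) x]
    simp only [List.foldl_cons, List.foldl_nil]
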